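-- pv_equiv track=rewrite | github.com/amansharma2910/pharma_no_harma | app/utils/helpers.py | generate_search_snippet
-- ===== SOURCE A (Python) =====
-- def truncate_text(text: str, max_length: int = 100, suffix: str = "...") -> str:
--     """Truncate text to specified length"""
--     if len(text) <= max_length:
--         return text
--     return text[:max_length - len(suffix)] + suffix
--
-- def generate_search_snippet(text: str, query: str, max_length: int = 200) -> str:
--     """Generate search snippet highlighting query terms"""
--     if not query or not text:
--         return truncate_text(text, max_length)
--
--     # Find the first occurrence of any query word
--     query_words = query.lower().split()
--     text_lower = text.lower()
--
--     best_position = -1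
--     for word in query_words:
--         pos = text_lower.find(word)
--         if pos != -1 and (best_position == -1 or pos < best_position):
--             best_position = pos
--
--     if best_position == -1:
--         return truncate_text(text, max_length)
--
--     # Extract snippet around the found position
--     start = max(0, best_position - max_length // 2)
--     end = min(len(text), start + max_length)
--
--     snippet = text[start:end]
--
--     # Add ellipsis if needed
--     if start > 0:
--         snippet = "..." + snippet
--     if end < len(text):
--         snippet = snippet + "..."
--
--     return snippet
-- ===== SOURCE B (Python) =====
-- def generate_search_snippet(text: str, query: str, max_length: int = 200) -> str:
--     """Generate search snippet highlighting query terms"""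
--     words = query.lower().split()
--     tl = text.lower()
--     best = next((i for i in range(len(text)) if any(tl.startswith(w, i) for w in words)), -1)
--     if best == -1:
--         return text if len(text) <= max_length else text[:max_length - 3] + "..."
--     start = max(0, best - max_length // 2)
--     end = min(len(text), start + max_length)
--     head = "..." if start > 0 else ""
--     tail = "..." if end < len(text) else ""
--     return head + text[start:end] + tail
-- ===== Notes on version B (the rewrite author's own statement) =====
-- stated objective: alternative
-- what changed: A runs str.find once per query word and tracks the minimum hit in a loop; B instead scans text positions left to right once and stops at the first position where any query word matches, which also subsumes A's empty-query/empty-text guard so the special cases disappear.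
import Mathlib
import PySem

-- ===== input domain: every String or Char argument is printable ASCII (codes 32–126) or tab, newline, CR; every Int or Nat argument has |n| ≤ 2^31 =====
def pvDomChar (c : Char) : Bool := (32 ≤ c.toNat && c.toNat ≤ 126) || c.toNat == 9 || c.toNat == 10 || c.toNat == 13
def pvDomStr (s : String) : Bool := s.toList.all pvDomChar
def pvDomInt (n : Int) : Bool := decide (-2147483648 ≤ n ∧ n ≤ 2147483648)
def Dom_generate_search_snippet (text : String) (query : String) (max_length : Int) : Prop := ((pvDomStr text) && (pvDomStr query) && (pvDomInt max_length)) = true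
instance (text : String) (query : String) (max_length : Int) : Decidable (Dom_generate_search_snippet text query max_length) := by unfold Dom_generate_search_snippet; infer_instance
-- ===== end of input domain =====

-- B replaces A's per-word str.find scans plus min-tracking loop by a single left-to-right
-- scan for the first position where any query word matches (objective: alternative).

-- ===== PORT A =====
-- truncate_text(text, max_length, suffix); string concatenation ported as list append + ofList (exact)
def truncate_text (text : String) (max_length : Int) (suffix : String) : String :=
  if PySem.Str.len text ≤ max_length then text
  else String.ofList (PySem.Chars.slice text.toList none (some (max_length - PySem.Str.len suffix)) ++ suffix.toList)

def generate_search_snippet (text : String) (query : String) (max_length : Int) : String :=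
  if query = "" ∨ text = "" then truncate_text text max_length "..."
  else
    let query_words := PySem.Chars.split₀ (PySem.Chars.lower query.toList)
    let text_lower := PySem.Chars.lower text.toList
    let best_position := query_words.foldl (fun best_position word =>
        let pos := PySem.Chars.find text_lower word
        if pos ≠ -1 ∧ (best_position = -1 ∨ pos < best_position) then pos else best_position) (-1)
    if best_position = -1 then truncate_text text max_length "..."
    else
      let start := max 0 (best_position - PySem.Int.floordiv max_length 2)
      let stop := min (PySem.Str.len text) (start + max_length)
      let snippet := PySem.Chars.slice text.toList (some start) (some stop)
      let snippet := if 0 < start then "...".toList ++ snippet else snippet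
      let snippet := if stop < PySem.Str.len text then snippet ++ "...".toList else snippet
      String.ofList snippet

-- ===== PORT B =====
-- tl.startswith(w, i) for 0 ≤ i < len(text) is ported exactly as startswith on (tl.drop i)
def generate_search_snippet_alt (text : String) (query : String) (max_length : Int) : String :=
  let words := PySem.Chars.split₀ (PySem.Chars.lower query.toList)
  let tl := PySem.Chars.lower text.toList
  let best : Int :=
    match (List.range text.toList.length).find?
        (fun i => words.any (fun w => PySem.Chars.startswith (List.drop i tl) w)) with
    | some i => (i : Int)
    | none => -1
  if best = -1 then
    if PySem.Str.len text ≤ max_length then text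
    else String.ofList (PySem.Chars.slice text.toList none (some (max_length - 3)) ++ "...".toList)
  else
    let start := max 0 (best - PySem.Int.floordiv max_length 2)
    let stop := min (PySem.Str.len text) (start + max_length)
    let head := if 0 < start then "...".toList else ([] : List Char)
    let tail := if stop < PySem.Str.len text then "...".toList else ([] : List Char)
    String.ofList (head ++ PySem.Chars.slice text.toList (some start) (some stop) ++ tail)

-- ===== PRECONDITION & SPEC =====
def Spec_generate_search_snippet (text : String) (query : String) (max_length : Int) (out : String) : Prop := out = generate_search_snippet_alt text query max_length
instance (text : String) (query : String) (max_length : Int) (out : String) : Decidable (Spec_generate_search_snippet text query max_length out) := by unfold Spec_generate_search_snippet; infer_instance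

-- ===== CLAIM (what is proved, stated in full; the proofs are below) =====
def Claim_equal_generate_search_snippet : Prop := ∀ (text : String) (query : String) (max_length : Int), Dom_generate_search_snippet text query max_length → Spec_generate_search_snippet text query max_length (generate_search_snippet text query max_length)

-- ===== LEMMAS AND PROOFS =====

-- A's loop body, named for the proofs (definitionally equal to the lambda in the port)
def pvStep (s : List Char) : Int → List Char → Int := fun best word =>
  let pos := PySem.Chars.find s word
  if pos ≠ -1 ∧ (best = -1 ∨ pos < best) then pos else best

-- characterisation of A's min-tracking fold
lemma foldA_spec (s : List Char) (ws : List (List Char)) (b : Int) (hb : b = -1 ∨ 0 ≤ b) :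
    (ws.foldl (pvStep s) b = -1 → b = -1 ∧ ∀ w ∈ ws, PySem.Chars.find s w = -1) ∧
    (ws.foldl (pvStep s) b ≠ -1 →
      0 ≤ ws.foldl (pvStep s) b ∧
      (ws.foldl (pvStep s) b = b ∨ ∃ w ∈ ws, ws.foldl (pvStep s) b = PySem.Chars.find s w) ∧
      (b = -1 ∨ ws.foldl (pvStep s) b ≤ b) ∧
      (∀ w ∈ ws, PySem.Chars.find s w = -1 ∨ ws.foldl (pvStep s) b ≤ PySem.Chars.find s w)) := by
  induction ws generalizing b with
  | nil =>
    constructor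
    · intro h
      simp only [List.foldl_nil] at h
      exact ⟨h, by simp⟩
    · intro h
      refine ⟨?_, Or.inl List.foldl_nil, ?_, by simp⟩
      · simp only [List.foldl_nil] at h ⊢; omega
      · simp only [List.foldl_nil]; omega
  | cons w ws ih =>
    have hfind := PySem.Chars.neg_one_le_find (s := s) (sub := w)
    set f := PySem.Chars.find s w with hf
    set b' := pvStep s b w with hb'
    have hfacts : (f ≠ -1 ∧ (b = -1 ∨ f < b) ∧ b' = f) ∨ ((f = -1 ∨ (b ≠ -1 ∧ b ≤ f)) ∧ b' = b) := by
      rw [hb']; unfold pvStep; dsimp only; rw [← hf]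
      split_ifs with hc
      · exact Or.inl ⟨hc.1, hc.2, rfl⟩
      · push_neg at hc
        by_cases hf1 : f = -1
        · exact Or.inr ⟨Or.inl hf1, rfl⟩
        · obtain ⟨hb1, hb2⟩ := hc hf1
          exact Or.inr ⟨Or.inr ⟨hb1, by omega⟩, rfl⟩
    have hb'cases : b' = -1 ∨ 0 ≤ b' := by rcases hfacts with ⟨h1, h2, h3⟩ | ⟨h1, h2⟩ <;> omega
    have hstep : (w :: ws).foldl (pvStep s) b = ws.foldl (pvStep s) b' := by
      rw [List.foldl_cons, ← hb']
    obtain ⟨ih1, ih2⟩ := ih b' hb'cases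
    rw [hstep]
    constructor
    · intro h
      obtain ⟨h1, h2⟩ := ih1 h
      have hbf : b = -1 ∧ f = -1 := by
        rcases hfacts with ⟨g1, g2, g3⟩ | ⟨g1, g2⟩ <;> rcases hb with hb | hb <;> omega
      refine ⟨hbf.1, ?_⟩
      intro w' hw'
      rcases List.mem_cons.mp hw' with hw' | hw'
      · rw [hw']; exact hbf.2
      · exact h2 _ hw'
    · intro h
      obtain ⟨R1, R2, R3, R4⟩ := ih2 h
      refine ⟨R1, ?_, ?_, ?_⟩
      · rcases R2 with R2 | ⟨w', hw', he⟩
        · rcases hfacts with ⟨g1, g2, g3⟩ | ⟨g1, g2⟩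
          · exact Or.inr ⟨w, List.mem_cons_self, by rw [R2, g3]⟩
          · exact Or.inl (by rw [R2, g2])
        · exact Or.inr ⟨w', List.mem_cons_of_mem _ hw', he⟩
      · rcases hb with hb | hb
        · exact Or.inl hb
        · right
          rcases hfacts with ⟨g1, g2, g3⟩ | ⟨g1, g2⟩ <;> rcases R3 with R3 | R3 <;> omega
      · intro w' hw'
        rcases List.mem_cons.mp hw' with hw' | hw'
        · rw [hw', ← hf]
          rcases hfacts with ⟨g1, g2, g3⟩ | ⟨g1, g2⟩ <;> rcases R3 with R3 | R3 <;> omega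
        · exact R4 _ hw'

-- prefix at a dropped position is an infix of the whole string
lemma prefix_drop_infix {w t : List Char} {i : Nat} (h : w <+: t.drop i) : w <:+: t :=
  h.isInfix.trans (t.drop_suffix i).isInfix

-- A's earliest-match fold equals B's first-position scan (t nonempty)
lemma best_eq (t : List Char) (ws : List (List Char)) (ht : t ≠ []) :
    ws.foldl (pvStep t) (-1)
    = match (List.range t.length).find?
        (fun i => ws.any (fun w => PySem.Chars.startswith (List.drop i t) w)) with
      | some i => (i : Int)
      | none => -1 := by
  obtain ⟨h1, h2⟩ := foldA_spec t ws (-1) (Or.inl rfl)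
  set r := ws.foldl (pvStep t) (-1) with hr
  by_cases hneg : r = -1
  · obtain ⟨-, hall⟩ := h1 hneg
    have : (List.range t.length).find?
        (fun i => ws.any (fun w => PySem.Chars.startswith (List.drop i t) w)) = none := by
      rw [List.find?_eq_none]
      intro i _hi
      simp only [Bool.not_eq_true, List.any_eq_false]
      intro w hw
      by_contra hsw
      rw [Bool.not_eq_false] at hsw
      have hpre : w <+: t.drop i := (PySem.Chars.startswith_iff _ _).mp hsw
      exact (PySem.Chars.find_ne_neg_one_iff _ _).mpr (prefix_drop_infix hpre) (hall w hw)
    rw [this, hneg]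
  · obtain ⟨hge, hsrc, -, hmin⟩ := h2 hneg
    rcases hsrc with hcon | ⟨w, hw, he⟩
    · omega
    · have hfw : 0 ≤ PySem.Chars.find t w := by omega
      obtain ⟨hwpre, hwmin⟩ := PySem.Chars.find_spec hfw
      rw [← he] at hwpre hwmin
      have hlt : r.toNat < t.length := by
        by_cases hwnil : w = []
        · subst hwnil
          have : PySem.Chars.find t ([] : List Char) = 0 := PySem.Chars.find_nil t
          have : r = 0 := by omega
          have : 0 < t.length := List.length_pos_iff.mpr ht
          omega
        · have hd : t.drop r.toNat ≠ [] := by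
            intro hnil
            rw [hnil] at hwpre
            exact hwnil (List.prefix_nil.mp hwpre)
          rw [ne_eq, List.drop_eq_nil_iff] at hd
          omega
      have hfound : (List.range t.length).find?
          (fun i => ws.any (fun w => PySem.Chars.startswith (List.drop i t) w)) = some r.toNat := by
        rw [List.find?_eq_some_iff_getElem]
        refine ⟨?_, r.toNat, by simpa using hlt, by simp, ?_⟩
        · simp only [List.any_eq_true]
          exact ⟨w, hw, (PySem.Chars.startswith_iff _ _).mpr hwpre⟩
        · intro j hj
          simp only [List.getElem_range, Bool.not_eq_eq_eq_not, Bool.not_true,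
            List.any_eq_false]
          intro w' hw'
          simp only [Bool.not_eq_true]
          rw [← Bool.not_eq_true]
          intro hsw'
          have hpre' : w' <+: t.drop j := (PySem.Chars.startswith_iff _ _).mp hsw'
          have hne' : PySem.Chars.find t w' ≠ -1 :=
            (PySem.Chars.find_ne_neg_one_iff _ _).mpr (prefix_drop_infix hpre')
          have hle : r ≤ PySem.Chars.find t w' := by
            rcases hmin w' hw' with h | h
            · exact absurd h hne'
            · exact h
          have hge' : 0 ≤ PySem.Chars.find t w' := by
            have := PySem.Chars.neg_one_le_find (s := t) (sub := w')
            omega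
          obtain ⟨-, hwmin'⟩ := PySem.Chars.find_spec hge'
          have : (PySem.Chars.find t w').toNat ≤ j := by
            by_contra hc
            exact hwmin' j (by omega) hpre'
          omega
      rw [hfound]
      simp [Int.toNat_of_nonneg hge]

-- ===== VERDICT (by name: the statement is the Claim_ definition above) =====
theorem generate_search_snippet_spec : Claim_equal_generate_search_snippet := by
  intro text query max_length _hdom
  unfold Spec_generate_search_snippet
  simp only [generate_search_snippet, generate_search_snippet_alt, truncate_text]
  set ws := PySem.Chars.split₀ (PySem.Chars.lower query.toList) with hws
  set tl := PySem.Chars.lower text.toList with htl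
  have hlen : text.toList.length = tl.length := by simp [htl, PySem.Chars.lower]
  have h3 : PySem.Str.len ("..." : String) = 3 := by decide
  by_cases hguard : query = "" ∨ text = ""
  · rw [if_pos hguard]
    have hnone : (List.range text.toList.length).find?
        (fun i => ws.any (fun w => PySem.Chars.startswith (List.drop i tl) w)) = none := by
      rcases hguard with hq | ht
      · have hwnil : ws = [] := by rw [hws, hq]; decide
        rw [hwnil]
        simp [List.find?_eq_none]
      · rw [ht]
        simp
    rw [hnone, h3]
    simp
  · have hqt := not_or.mp hguard
    have htlne : tl ≠ [] := by
      intro h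
      have h0 : text.toList = [] := List.eq_nil_of_length_eq_zero (by rw [hlen, h]; rfl)
      exact hqt.2 (by simpa using congrArg String.ofList h0)
    have hfold : ws.foldl (fun best_position word =>
        if PySem.Chars.find tl word ≠ -1 ∧ (best_position = -1 ∨ PySem.Chars.find tl word < best_position) then
          PySem.Chars.find tl word
        else best_position) (-1) = ws.foldl (pvStep tl) (-1) := rfl
    rw [if_neg hguard, hfold, hlen, ← best_eq tl ws htlne]
    by_cases hbz : ws.foldl (pvStep tl) (-1) = -1
    · rw [if_pos hbz, if_pos hbz, h3]
    · rw [if_neg hbz, if_neg hbz]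
      split_ifs <;> simp
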